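-- pv_equiv track=rewrite | github.com/Myunwoo/algorithm_study | hackerrank/count-number-pairs.py | countAffordablePairs
-- ===== SOURCE A (Python) =====
-- def countAffordablePairs(prices, budget):
--     if len(prices) < 2:
--         return 0
--
--     answer = 0
--     for i in range(len(prices)-1):
--         for j in range(i+1, len(prices)):
--             if prices[i] + prices[j] <= budget:
--                 answer += 1
--     return answer
-- ===== SOURCE B (Python) =====
-- def countAffordablePairs(prices, budget):
--     a = sorted(prices)
--     lo, hi = 0, len(a) - 1
--     answer = 0
--     while lo < hi:
--         if a[lo] + a[hi] <= budget:
--             answer += hi - lo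
--             lo += 1
--         else:
--             hi -= 1
--     return answer
-- ===== Notes on version B (the rewrite author's own statement) =====
-- stated objective: faster
-- what changed: Replaced the O(n^2) double loop over all index pairs by sorting the prices and counting pairs with a two-pointer sweep from both ends.
import Mathlib
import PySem

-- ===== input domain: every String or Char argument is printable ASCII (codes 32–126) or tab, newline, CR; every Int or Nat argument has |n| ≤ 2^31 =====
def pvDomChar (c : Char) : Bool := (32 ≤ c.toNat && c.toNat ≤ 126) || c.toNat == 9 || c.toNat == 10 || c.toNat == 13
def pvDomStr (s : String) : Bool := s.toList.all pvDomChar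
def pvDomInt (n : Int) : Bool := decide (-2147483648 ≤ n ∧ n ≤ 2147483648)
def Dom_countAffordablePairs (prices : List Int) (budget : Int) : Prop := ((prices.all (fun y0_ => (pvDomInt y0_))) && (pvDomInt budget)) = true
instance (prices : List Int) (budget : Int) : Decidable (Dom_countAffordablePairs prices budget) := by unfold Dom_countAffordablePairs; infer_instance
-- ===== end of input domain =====

-- B replaces A's double loop over all index pairs by sorting the prices and a two-pointer sweep.

-- ===== PORT A =====
-- literal transliteration of A's nested index loops
def countAffordablePairs (prices : List Int) (budget : Int) : Int :=
  if prices.length < 2 then 0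
  else
    (PySem.List.pyRange 0 ((prices.length : Int) - 1) 1).foldl (fun answer i =>
      (PySem.List.pyRange (i + 1) (prices.length : Int) 1).foldl (fun answer j =>
        if PySem.List.pyGetD prices i 0 + PySem.List.pyGetD prices j 0 ≤ budget then
          answer + 1
        else answer) answer) 0

-- ===== PORT B =====
-- the while-loop of Source B: lo/hi two-pointer sweep over the sorted list
def tpLoop (a : List Int) (budget : Int) (lo hi : Int) (answer : Int) : Int :=
  if lo < hi then
    if PySem.List.pyGetD a lo 0 + PySem.List.pyGetD a hi 0 ≤ budget then
      tpLoop a budget (lo + 1) hi (answer + (hi - lo))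
    else
      tpLoop a budget lo (hi - 1) answer
  else answer
termination_by (hi - lo).toNat
decreasing_by all_goals omega

def countAffordablePairs_alt (prices : List Int) (budget : Int) : Int :=
  let a := PySem.List.sorted prices (fun x => x) false
  tpLoop a budget 0 ((a.length : Int) - 1) 0

-- ===== PRECONDITION & SPEC =====
def Spec_countAffordablePairs (prices : List Int) (budget : Int) (out : Int) : Prop := out = countAffordablePairs_alt prices budget
instance (prices : List Int) (budget : Int) (out : Int) : Decidable (Spec_countAffordablePairs prices budget out) := by unfold Spec_countAffordablePairs; infer_instance

-- ===== CLAIM (what is proved, stated in full; the proofs are below) =====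
def Claim_equal_countAffordablePairs : Prop := ∀ (prices : List Int) (budget : Int), Dom_countAffordablePairs prices budget → Spec_countAffordablePairs prices budget (countAffordablePairs prices budget)

-- ===== LEMMAS AND PROOFS =====

-- number of index pairs i < j with l[i] + l[j] ≤ b, recursing on the head
def pairCnt (b : Int) : List Int → Int
  | [] => 0
  | x :: xs => ((xs.countP (fun y => decide (x + y ≤ b))) : Int) + pairCnt b xs

theorem pairCnt_small (b : Int) {l : List Int} (h : l.length ≤ 1) : pairCnt b l = 0 := by
  cases l with
  | nil => rfl
  | cons x xs =>
      cases xs with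
      | nil => simp [pairCnt]
      | cons y ys => simp at h

theorem pairCnt_perm (b : Int) {l l' : List Int} (h : l.Perm l') :
    pairCnt b l = pairCnt b l' := by
  induction h with
  | nil => rfl
  | cons x h ih => simp [pairCnt, ih, h.countP_eq]
  | swap x y l =>
      simp only [pairCnt, List.countP_cons]
      have hc : (decide (y + x ≤ b)) = (decide (x + y ≤ b)) := by rw [Int.add_comm]
      rw [hc]; split_ifs <;> push_cast <;> ring
  | trans _ _ ih1 ih2 => exact ih1.trans ih2

theorem pairCnt_append_singleton (b z : Int) (u : List Int) :
    pairCnt b (u ++ [z]) = pairCnt b u + ((u.countP (fun y => decide (y + z ≤ b))) : Int) := by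
  induction u with
  | nil => simp [pairCnt]
  | cons x xs ih =>
      simp only [List.cons_append, pairCnt, List.countP_append, List.countP_cons, ih]
      have hc : (decide (x + z ≤ b)) = (decide (z + x ≤ b)) := by rw [Int.add_comm]
      simp [hc]; ring

-- inner loop of A = counting over the tail
theorem inner_eq (prices : List Int) (budget : Int) (x acc : Int) {a : Int} (ha : 0 ≤ a) :
    (PySem.List.pyRange a (prices.length : Int) 1).foldl (fun answer j =>
        if x + PySem.List.pyGetD prices j 0 ≤ budget then answer + 1 else answer) acc
      = acc + (((prices.drop a.toNat).countP (fun y => decide (x + y ≤ budget))) : Int) := by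
  rw [PySem.List.foldl_pyRange_pyGetD' prices 0 (fun answer y => if x + y ≤ budget then answer + 1 else answer) acc ha]
  generalize prices.drop a.toNat = l
  induction l generalizing acc with
  | nil => simp
  | cons y ys ih => simp [List.countP_cons, ih]; split_ifs <;> push_cast <;> ring

-- outer loop of A from index a = pairCnt of the dropped list
theorem outer_eq (prices : List Int) (budget : Int) :
    ∀ (k : Nat) (a : Int) (acc : Int), 0 ≤ a → (prices.length : Int) - a = k →
    (PySem.List.pyRange a (prices.length : Int) 1).foldl (fun answer i =>
      (PySem.List.pyRange (i + 1) (prices.length : Int) 1).foldl (fun answer j =>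
        if PySem.List.pyGetD prices i 0 + PySem.List.pyGetD prices j 0 ≤ budget then
          answer + 1
        else answer) answer) acc
      = acc + pairCnt budget (prices.drop a.toNat) := by
  intro k
  induction k with
  | zero =>
      intro a acc ha hk
      rw [PySem.List.pyRange_one_eq_nil (by omega)]
      rw [List.drop_eq_nil_of_le (by omega)]
      simp [pairCnt]
  | succ k ih =>
      intro a acc ha hk
      have halt : a < (prices.length : Int) := by omega
      rw [PySem.List.pyRange_one_cons halt]
      simp only [List.foldl_cons]
      rw [inner_eq prices budget _ acc (by omega : (0:Int) ≤ a + 1)]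
      rw [ih (a+1) _ (by omega) (by omega)]
      have hdrop : prices.drop a.toNat =
          PySem.List.pyGetD prices a 0 :: prices.drop (a + 1).toNat := by
        rw [PySem.List.pyGetD_eq_getElem prices 0 ha halt]
        have h1 : a.toNat < prices.length := by omega
        have h2 : (a + 1).toNat = a.toNat + 1 := by omega
        rw [h2, List.drop_eq_getElem_cons h1]
      rw [hdrop]
      simp only [pairCnt]; ring

-- segment of the sorted list: elements at indices lo..hi
def seg (s : List Int) (lo hi : Int) : List Int := (s.take (hi.toNat + 1)).drop lo.toNat

theorem mem_seg {s : List Int} {lo hi y : Int} (h : y ∈ seg s lo hi) :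
    ∃ j : Nat, lo.toNat ≤ j ∧ j ≤ hi.toNat ∧ ∃ hj : j < s.length, y = s[j] := by
  unfold seg at h
  obtain ⟨k, hk, hky⟩ := List.getElem_of_mem h
  have hlen : (List.drop lo.toNat (List.take (hi.toNat + 1) s)).length
      = min (hi.toNat + 1) s.length - lo.toNat := by simp
  have hj1 : lo.toNat + k < s.length := by omega
  refine ⟨lo.toNat + k, by omega, by omega, hj1, ?_⟩
  rw [← hky, List.getElem_drop, List.getElem_take]

theorem seg_cons {s : List Int} {lo hi : Int} (h0 : 0 ≤ lo) (hlt : lo < hi)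
    (hn : hi < (s.length : Int)) :
    seg s lo hi = s[lo.toNat]'(by omega) :: seg s (lo + 1) hi := by
  unfold seg
  have h1 : lo.toNat < (s.take (hi.toNat + 1)).length := by
    simp [List.length_take]; omega
  rw [List.drop_eq_getElem_cons h1, List.getElem_take]
  have h2 : (lo + 1).toNat = lo.toNat + 1 := by omega
  rw [h2]

theorem seg_snoc {s : List Int} {lo hi : Int} (_h0 : 0 ≤ lo) (hlt : lo < hi)
    (hn : hi < (s.length : Int)) :
    seg s lo hi = seg s lo (hi - 1) ++ [s[hi.toNat]'(by omega)] := by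
  unfold seg
  have h1 : hi.toNat < s.length := by omega
  have h2 : (hi - 1).toNat + 1 = hi.toNat := by omega
  rw [h2, List.take_add_one, List.getElem?_eq_getElem h1]
  simp only [Option.toList_some]
  rw [List.drop_append_of_le_length (by simp [List.length_take]; omega)]

theorem seg_len {s : List Int} {lo hi : Int} (h0 : 0 ≤ lo) (hle : lo ≤ hi + 1)
    (hge : 0 ≤ hi) (hn : hi < (s.length : Int)) :
    (seg s lo hi).length = hi.toNat + 1 - lo.toNat := by
  unfold seg
  simp only [List.length_drop, List.length_take]
  omega

-- two-pointer loop counts the pairs inside the segment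
theorem tpLoop_eq (s : List Int) (budget : Int)
    (hmono : ∀ (p q : Nat) (hq : q < s.length) (hpq : p ≤ q), s[p]'(by omega) ≤ s[q]) :
    ∀ (k : Nat) (lo hi acc : Int), 0 ≤ lo → hi < (s.length : Int) → (hi - lo).toNat = k →
    tpLoop s budget lo hi acc = acc + pairCnt budget (seg s lo hi) := by
  intro k
  induction k with
  | zero =>
      intro lo hi acc h0 hn hk
      have hnl : ¬ lo < hi := by omega
      rw [tpLoop, if_neg hnl]
      have hlen : (seg s lo hi).length ≤ 1 := by
        unfold seg; simp only [List.length_drop, List.length_take]; omega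
      rw [pairCnt_small budget hlen]; ring
  | succ k ih =>
      intro lo hi acc h0 hn hk
      have hlt : lo < hi := by omega
      have hlol : lo.toNat < s.length := by omega
      have hhil : hi.toNat < s.length := by omega
      rw [tpLoop, if_pos hlt,
        PySem.List.pyGetD_eq_getElem s 0 h0 (by omega),
        PySem.List.pyGetD_eq_getElem s 0 (by omega) hn]
      by_cases hc : s[lo.toNat] + s[hi.toNat] ≤ budget
      · rw [if_pos hc, ih (lo + 1) hi _ (by omega) hn (by omega)]
        rw [seg_cons h0 hlt hn]
        simp only [pairCnt]
        have hcnt : (seg s (lo + 1) hi).countP (fun y => decide (s[lo.toNat] + y ≤ budget))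
            = (seg s (lo + 1) hi).length := by
          rw [List.countP_eq_length]
          intro y hy
          obtain ⟨j, hj1, hj2, hj3, hj4⟩ := mem_seg hy
          have hyhi : y ≤ s[hi.toNat] := by
            rw [hj4]; exact hmono j hi.toNat hhil hj2
          simp only [decide_eq_true_eq]
          omega
        rw [hcnt, seg_len (by omega) (by omega) (by omega) hn]
        have : ((hi.toNat + 1 - (lo + 1).toNat : Nat) : Int) = hi - lo := by omega
        rw [this]; ring
      · rw [if_neg hc, ih lo (hi - 1) acc h0 (by omega) (by omega)]
        rw [seg_snoc h0 hlt hn, pairCnt_append_singleton]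
        have hz : (seg s lo (hi - 1)).countP (fun y => decide (y + s[hi.toNat] ≤ budget)) = 0 := by
          rw [List.countP_eq_zero]
          intro y hy
          obtain ⟨j, hj1, hj2, hj3, hj4⟩ := mem_seg hy
          have hylo : s[lo.toNat] ≤ y := by
            rw [hj4]; exact hmono lo.toNat j hj3 hj1
          simp only [decide_eq_true_eq]
          omega
        rw [hz]; ring

theorem A_eq_pairCnt (prices : List Int) (budget : Int) :
    countAffordablePairs prices budget = pairCnt budget prices := by
  unfold countAffordablePairs
  by_cases h2 : prices.length < 2
  · rw [if_pos h2, pairCnt_small budget (by omega)]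
  · rw [if_neg h2]
    have hn1 : (0:Int) ≤ (prices.length : Int) - 1 := by omega
    have hsplit : PySem.List.pyRange 0 (prices.length : Int) 1
        = PySem.List.pyRange 0 ((prices.length : Int) - 1) 1 ++ [(prices.length : Int) - 1] := by
      have h := PySem.List.pyRange_one_succ_right (a := 0) (b := (prices.length : Int) - 1) hn1
      rw [sub_add_cancel] at h
      exact h
    have hfull := outer_eq prices budget prices.length 0 0 le_rfl (by omega)
    rw [hsplit, List.foldl_append] at hfull
    simp only [List.foldl_cons, List.foldl_nil] at hfull
    rw [PySem.List.pyRange_one_eq_nil (by omega : (prices.length : Int) ≤ ((prices.length : Int) - 1) + 1)] at hfull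
    simp only [List.foldl_nil, Int.toNat_zero, List.drop_zero, zero_add] at hfull
    exact hfull

theorem B_eq_pairCnt (prices : List Int) (budget : Int) :
    countAffordablePairs_alt prices budget = pairCnt budget prices := by
  unfold countAffordablePairs_alt
  have hperm := PySem.List.sorted_perm prices (fun x => x) false
  set s := PySem.List.sorted prices (fun x => x) false with hs
  have hmono : ∀ (p q : Nat) (hq : q < s.length) (hpq : p ≤ q), s[p]'(by omega) ≤ s[q] := by
    intro p q hq hpq
    exact PySem.List.sorted_id_getElem_mono prices hpq hq
  rw [tpLoop_eq s budget hmono (((s.length : Int) - 1) - 0).toNat 0 ((s.length : Int) - 1) 0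
      le_rfl (by omega) rfl]
  have hseg : seg s 0 ((s.length : Int) - 1) = s := by
    unfold seg
    rw [List.take_of_length_le (by omega), Int.toNat_zero, List.drop_zero]
  rw [hseg, pairCnt_perm budget hperm]
  ring

-- ===== VERDICT (by name: the statement is the Claim_ definition above) =====
theorem countAffordablePairs_spec : Claim_equal_countAffordablePairs := by
  intro prices budget _
  unfold Spec_countAffordablePairs
  rw [A_eq_pairCnt, B_eq_pairCnt]
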